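-- pv_equiv track=rewrite | github.com/arifkhan1990/Competitive-Programming | Codingninjas/Hash Table/Count Positive - Negative Pairs.py | countPositiveNegativePairs
-- ===== SOURCE A (Python) =====
-- def countPositiveNegativePairs(arr, n):
--     mp = {}
--     ans = 0
--     for i in arr:
--         if i < 0:
--             mp[i] = mp.get(i, 0) + 1
--
--     for i in arr:
--         if -i in mp:
--             ans += mp.get(-i)
--     return ans
-- ===== SOURCE B (Python) =====
-- def countPositiveNegativePairs(arr, n):
--     pos = [x for x in arr if x > 0]
--     negs = [y for y in arr if y < 0]
--     ans = 0
--     for x in pos: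
--         for y in negs:
--             if x + y == 0:
--                 ans += 1
--     return ans
-- ===== Notes on version B (the rewrite author's own statement) =====
-- stated objective: alternative
-- what changed: B drops A's hash table entirely: it splits the array into its positive and negative elements and counts matching pairs by a direct nested enumeration over the two sign-split lists.
import Mathlib
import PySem

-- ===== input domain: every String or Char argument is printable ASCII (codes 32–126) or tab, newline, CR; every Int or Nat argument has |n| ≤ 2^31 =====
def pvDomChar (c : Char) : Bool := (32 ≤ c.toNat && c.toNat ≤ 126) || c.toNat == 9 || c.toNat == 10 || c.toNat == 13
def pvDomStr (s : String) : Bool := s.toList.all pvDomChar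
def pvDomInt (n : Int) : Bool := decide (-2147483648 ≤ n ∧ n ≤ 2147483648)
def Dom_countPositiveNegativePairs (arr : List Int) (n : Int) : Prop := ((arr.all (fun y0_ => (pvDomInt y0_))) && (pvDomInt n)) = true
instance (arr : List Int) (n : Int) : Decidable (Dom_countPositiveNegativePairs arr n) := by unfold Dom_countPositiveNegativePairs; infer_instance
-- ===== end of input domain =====

-- B replaces A's negative-count hash table with a direct nested enumeration of matching
-- pairs over the sign-split lists (alternative decomposition; quadratic, not faster).


-- ===== PORT A =====
def countPositiveNegativePairs (arr : List Int) (n : Int) : Int :=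
  let mp : PySem.Dict Int Int :=
    arr.foldl (fun mp i => if i < 0 then mp.insert i (mp.getD i 0 + 1) else mp) PySem.Dict.empty
  arr.foldl (fun ans i => if mp.contains (-i) then ans + mp.getD (-i) 0 else ans) 0

-- ===== PORT B =====
def countPositiveNegativePairs_alt (arr : List Int) (n : Int) : Int :=
  let pos := arr.filter (fun x => decide (0 < x))
  let negs := arr.filter (fun y => decide (y < 0))
  pos.foldl (fun ans x => negs.foldl (fun ans y => if x + y = 0 then ans + 1 else ans) ans) 0

-- ===== PRECONDITION & SPEC =====
def Spec_countPositiveNegativePairs (arr : List Int) (n : Int) (out : Int) : Prop := out = countPositiveNegativePairs_alt arr n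
instance (arr : List Int) (n : Int) (out : Int) : Decidable (Spec_countPositiveNegativePairs arr n out) := by unfold Spec_countPositiveNegativePairs; infer_instance

-- ===== CLAIM (what is proved, stated in full; the proofs are below) =====
def Claim_equal_countPositiveNegativePairs : Prop := ∀ (arr : List Int) (n : Int), Dom_countPositiveNegativePairs arr n → Spec_countPositiveNegativePairs arr n (countPositiveNegativePairs arr n)

-- ===== LEMMAS AND PROOFS =====

-- a fold whose body acts only when p holds is a fold over the filtered list
theorem pv_foldl_if_filter {α β : Type} (p : α → Prop) [DecidablePred p] (f : β → α → β) :
    ∀ (l : List α) (b : β),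
      l.foldl (fun d i => if p i then f d i else d) b
        = (l.filter (fun i => decide (p i))).foldl f b := by
  intro l
  induction l with
  | nil => intro b; rfl
  | cons x t ih =>
    intro b
    by_cases hx : p x <;> simp [hx, ih]

-- an accumulate-if loop is the accumulator plus the sum of an indicator map
theorem pv_foldl_add_if {α : Type} (p : α → Prop) [DecidablePred p] (g : α → Int)
    (l : List α) (a : Int) :
    l.foldl (fun acc x => if p x then acc + g x else acc) a
      = a + (l.map (fun x => if p x then g x else 0)).sum := by
  have h : (fun (acc : Int) x => if p x then acc + g x else acc)
      = (fun acc x => acc + (if p x then g x else 0)) := by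
    funext acc x; split_ifs <;> simp
  rw [h, PySem.List.foldl_add]

-- summing an if-guarded map equals summing over the filtered list
theorem pv_sum_map_if_filter (p : Int → Prop) [DecidablePred p] (h : Int → Int) :
    ∀ (l : List Int),
      (l.map (fun i => if p i then h i else 0)).sum
        = ((l.filter (fun i => decide (p i))).map h).sum := by
  intro l
  induction l with
  | nil => rfl
  | cons x t ih => by_cases hx : p x <;> simp [hx, ih]

-- the indicator sum over a list counts the occurrences of -x
theorem pv_sum_indicator_count (x : Int) :
    ∀ (l : List Int),
      (l.map (fun y => if x + y = 0 then (1 : Int) else 0)).sum = (l.count (-x) : Int) := by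
  intro l
  induction l with
  | nil => rfl
  | cons a t ih =>
    by_cases ha : x + a = 0
    · have : a = -x := by omega
      simp [this, List.count_cons, ih]; omega
    · have : ¬ (a = -x) := by omega
      simp [ha, this, ih]

-- ===== VERDICT (by name: the statement is the Claim_ definition above) =====
theorem countPositiveNegativePairs_spec : Claim_equal_countPositiveNegativePairs := by
  intro arr n _
  unfold Spec_countPositiveNegativePairs countPositiveNegativePairs countPositiveNegativePairs_alt
  rw [pv_foldl_if_filter (fun i => i < 0)
        (fun (d : PySem.Dict Int Int) i => d.insert i (d.getD i 0 + 1)) arr PySem.Dict.empty]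
  simp only [PySem.Dict.foldl_insert_getD_add_one_eq_counter, PySem.Dict.contains_counter,
    PySem.Dict.getD_counter]
  set negs := arr.filter (fun i => decide (i < 0)) with hnegs
  -- B: inner loop is an indicator sum, outer loop accumulates it
  have hinner : (fun (ans : Int) (x : Int) =>
        negs.foldl (fun ans y => if x + y = 0 then ans + 1 else ans) ans)
      = (fun ans x => ans + (negs.count (-x) : Int)) := by
    funext ans x
    rw [pv_foldl_add_if (fun y => x + y = 0) (fun _ => (1 : Int)) negs ans,
        pv_sum_indicator_count x negs]
  rw [hinner, PySem.List.foldl_add]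
  -- A: accumulate-if loop is an indicator sum over arr
  rw [pv_foldl_add_if (fun i => negs.contains (-i) = true)
        (fun i => (negs.count (-i) : Int)) arr 0]
  -- pointwise: A's per-element contribution is the positive-guarded count
  have hpt : (fun i => if negs.contains (-i) = true then (negs.count (-i) : Int) else 0)
      = (fun i => if 0 < i then (negs.count (-i) : Int) else 0) := by
    funext i
    by_cases h0 : 0 < i
    · by_cases hc : negs.contains (-i) = true
      · rw [if_pos hc, if_pos h0]
      · have hm : (-i) ∉ negs := by simpa [List.contains_eq_mem] using hc
        rw [if_neg hc, if_pos h0, List.count_eq_zero.mpr hm]; rfl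
    · have hm : (-i) ∉ negs := by
        intro hmem
        have := List.of_mem_filter hmem
        simp at this; omega
      simp [h0, List.contains_eq_mem, hm]
  rw [hpt, pv_sum_map_if_filter (fun i => 0 < i) (fun i => (negs.count (-i) : Int)) arr]
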